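-- pv_equiv track=rewrite | github.com/Maxwell-Yo-Lin/OthelloGame | othello_user_interface.py | tile_count
-- ===== SOURCE A (Python) =====
-- def tile_count(board:list)->list:
--     'counts the total black tiles and white tiles then returns a list expressing how many of each there are; [black,white]'
--     black =0
--     white = 0
--     for rows in board:
--         for cols in rows:
--             if cols == "B":
--                 black +=1
--             elif cols == "W":
--                 white +=1
--     return [black,white]
-- ===== SOURCE B (Python) =====
-- def tile_count(board: list) -> list:
--     'counts the total black tiles and white tiles then returns a list expressing how many of each there are; [black,white]'
--     cells = [c for row in board for c in row]
--
--     def count(lo, hi):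
--         # counts (black, white) in cells[lo:hi] by divide and conquer
--         if hi - lo == 0:
--             return (0, 0)
--         if hi - lo == 1:
--             return (1, 0) if cells[lo] == "B" else (0, 1) if cells[lo] == "W" else (0, 0)
--         mid = (lo + hi) // 2
--         b1, w1 = count(lo, mid)
--         b2, w2 = count(mid, hi)
--         return (b1 + b2, w1 + w2)
--
--     b, w = count(0, len(cells))
--     return [b, w]
-- ===== Notes on version B (the rewrite author's own statement) =====
-- stated objective: alternative
-- what changed: Replaces A's fused linear if/elif accumulator loop by flattening the board once and counting with a divide-and-conquer recursion that splits the cell list in halves and adds the pair counts of the two halves.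
import Mathlib
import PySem

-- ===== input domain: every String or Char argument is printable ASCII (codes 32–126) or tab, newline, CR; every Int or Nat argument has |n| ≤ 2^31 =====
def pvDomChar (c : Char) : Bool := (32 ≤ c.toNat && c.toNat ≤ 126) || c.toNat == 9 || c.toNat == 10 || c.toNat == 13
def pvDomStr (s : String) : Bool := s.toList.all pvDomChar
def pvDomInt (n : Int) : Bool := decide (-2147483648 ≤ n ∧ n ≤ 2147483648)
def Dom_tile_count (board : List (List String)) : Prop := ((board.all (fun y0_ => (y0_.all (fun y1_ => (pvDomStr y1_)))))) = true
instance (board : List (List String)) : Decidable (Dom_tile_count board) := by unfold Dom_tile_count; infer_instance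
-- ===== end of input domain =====

-- B flattens the board once and counts by divide-and-conquer recursion on index halves, instead of A's fused linear if/elif accumulator loop; objective: alternative (same cost, different algorithm shape).


-- ===== PORT A =====
-- fused pass: one (black, white) accumulator threaded through nested loops with the if/elif chain
def tile_count (board : List (List String)) : List Int :=
  let bw := board.foldl (fun acc rows =>
    rows.foldl (fun (acc : Int × Int) cols =>
      if cols == "B" then (acc.1 + 1, acc.2)
      else if cols == "W" then (acc.1, acc.2 + 1)
      else acc) acc) (0, 0)
  [bw.1, bw.2]

-- ===== PORT B =====
-- divide and conquer: (black, white) counts of cells[lo:hi], splitting at the midpoint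
-- fuel = hi - lo bounds the recursion depth (totality guard only; never hit at 0 on the calls made)
def pvCountDC (cells : List String) (fuel lo hi : Nat) : Int × Int :=
  match fuel with
  | 0 => (0, 0)
  | fuel + 1 =>
    if hi - lo = 0 then (0, 0)
    else if hi - lo = 1 then
      if PySem.List.pyGetD cells (lo : Int) "" == "B" then (1, 0)
      else if PySem.List.pyGetD cells (lo : Int) "" == "W" then (0, 1)
      else (0, 0)
    else
      ((pvCountDC cells fuel lo ((lo + hi) / 2)).1 + (pvCountDC cells fuel ((lo + hi) / 2) hi).1,
       (pvCountDC cells fuel lo ((lo + hi) / 2)).2 + (pvCountDC cells fuel ((lo + hi) / 2) hi).2)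

def tile_count_alt (board : List (List String)) : List Int :=
  let cells := board.flatten
  let bw := pvCountDC cells cells.length 0 cells.length
  [bw.1, bw.2]

-- ===== PRECONDITION & SPEC =====
def Spec_tile_count (board : List (List String)) (out : List Int) : Prop := out = tile_count_alt board
instance (board : List (List String)) (out : List Int) : Decidable (Spec_tile_count board out) := by unfold Spec_tile_count; infer_instance

-- ===== CLAIM (what is proved, stated in full; the proofs are below) =====
def Claim_equal_tile_count : Prop := ∀ (board : List (List String)), Dom_tile_count board → Spec_tile_count board (tile_count board)

-- ===== LEMMAS AND PROOFS =====

theorem row_fold (rows : List String) (acc : Int × Int) :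
    rows.foldl (fun (acc : Int × Int) cols =>
      if cols == "B" then (acc.1 + 1, acc.2)
      else if cols == "W" then (acc.1, acc.2 + 1)
      else acc) acc
    = (acc.1 + rows.count "B", acc.2 + rows.count "W") := by
  induction rows generalizing acc with
  | nil => simp
  | cons c cs ih =>
      simp only [List.foldl]
      split_ifs with h1 h2 <;>
        simp_all [beq_iff_eq] <;> omega

theorem board_fold (board : List (List String)) (acc : Int × Int) :
    board.foldl (fun acc rows =>
      rows.foldl (fun (acc : Int × Int) cols =>
        if cols == "B" then (acc.1 + 1, acc.2)
        else if cols == "W" then (acc.1, acc.2 + 1)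
        else acc) acc) acc
    = (acc.1 + board.flatten.count "B", acc.2 + board.flatten.count "W") := by
  induction board generalizing acc with
  | nil => simp
  | cons r rs ih =>
      rw [List.foldl_cons, row_fold, ih]
      refine Prod.ext ?_ ?_ <;> simp [List.count_append] <;> ring

theorem dc_count_aux (n : Nat) (cells : List String) :
    ∀ lo hi, hi - lo ≤ n → lo ≤ hi → hi ≤ cells.length →
    pvCountDC cells n lo hi
      = ((((cells.drop lo).take (hi - lo)).count "B" : Int),
         (((cells.drop lo).take (hi - lo)).count "W" : Int)) := by
  induction n with
  | zero =>
      intro lo hi hb hle hhi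
      have h : hi = lo := by omega
      subst h
      simp [pvCountDC]
  | succ n ih =>
      intro lo hi hb hle hhi
      rw [pvCountDC]
      by_cases h0 : hi - lo = 0
      · have h : hi = lo := by omega
        subst h; simp
      · by_cases h1 : hi - lo = 1
        · have hlt : lo < cells.length := by omega
          have hseg : (cells.drop lo).take (hi - lo) = [cells[lo]] := by
            rw [h1, List.take_one, List.head?_drop]
            simp [List.getElem?_eq_getElem hlt]
          have hget : PySem.List.pyGetD cells (lo : Int) "" = cells[lo] := by
            simp [PySem.List.pyGetD_natCast, List.getD_eq_getElem?_getD,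
              List.getElem?_eq_getElem hlt]
          rw [hseg, hget]
          simp only [h1, if_true]
          split_ifs with hB hW <;> simp_all [beq_iff_eq]
        · have hm1 : lo ≤ (lo + hi) / 2 := by omega
          have hm2 : (lo + hi) / 2 ≤ hi := by omega
          rw [ih lo ((lo + hi) / 2) (by omega) hm1 (by omega),
              ih ((lo + hi) / 2) hi (by omega) hm2 hhi]
          have hsplit : (cells.drop lo).take (hi - lo)
              = (cells.drop lo).take ((lo + hi) / 2 - lo)
                ++ (cells.drop ((lo + hi) / 2)).take (hi - (lo + hi) / 2) := by
            rw [show cells.drop ((lo + hi) / 2)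
                  = (cells.drop lo).drop ((lo + hi) / 2 - lo) from by
                rw [List.drop_drop]; congr 1; omega,
              ← List.take_add]
            congr 1
            omega
          rw [hsplit]
          simp only [h0, h1, List.count_append]
          constructor

theorem dc_count (cells : List String) :
    pvCountDC cells cells.length 0 cells.length
      = ((cells.count "B" : Int), (cells.count "W" : Int)) := by
  rw [dc_count_aux (cells.length) cells 0 cells.length (by omega) (by omega) (le_refl _)]
  simp

-- ===== VERDICT (by name: the statement is the Claim_ definition above) =====
theorem tile_count_spec : Claim_equal_tile_count := by
  intro board _
  unfold Spec_tile_count tile_count tile_count_alt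
  rw [board_fold]
  simp only [dc_count]
  simp
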